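-- pv_equiv track=rewrite | github.com/aalp75/Project-Euler | e219.py | solve
-- ===== SOURCE A (Python) =====
-- def solve(N):
--     cost = [0] * 100 # enough space
--     cost[1] = 1
--     cost[4] = 1
--     score = 5
--     count = 2
--     for i in range(1, N):
--         needed = N - count
--         available = min(cost[i], needed)
--         score -= available * i
--         cost[i + 1] += available
--         cost[i + 4] += available
--         score += available * (i + 1) + available * (i + 4)
--         count += available
--         if count == N:
--             break
--     return score
-- ===== SOURCE B (Python) =====
-- def solve(N):
--     if N <= 2:
--         return 5
--     # Stage 1: creation counts per cost (n[c] = n[c-1] + n[c-4]; the seed leaves of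
--     # cost 1 and 4 are included) and running totals S[c] = 2 + n[1] + ... + n[c],
--     # grown until the totals reach N.
--     n = [0, 1, 1, 1, 2]
--     S = [2, 3, 4, 5, 7]
--     while S[-1] < N:
--         n.append(n[-1] + n[-4])
--         S.append(S[-1] + n[-1])
--     # Stage 2: cheapest level L whose running total reaches N; R leaves are expanded there.
--     L = 0
--     while S[L] < N:
--         L += 1
--     R = N - S[L - 1]
--
--     # number of leaves expanded (turned internal) at cost j
--     def x(j):
--         if 1 <= j < L:
--             return n[j]
--         if j == L:
--             return R
--         return 0
--
--     # Stage 3: total cost of the final leaf multiset: n[L]-R created leaves of cost L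
--     # survive, every leaf expanded at cost c-1 or c-4 leaves a child of cost c, and
--     # the seed leaf of cost 4 survives when it is never expanded.
--     total = (n[L] - R) * L
--     for c in range(L + 1, L + 5):
--         total += (x(c - 1) + x(c - 4) + (1 if c == 4 else 0)) * c
--     return total
-- ===== Notes on version B (the rewrite author's own statement) =====
-- stated objective: alternative
-- what changed: Replaces A's online greedy simulation (preallocated indexed cost array, per-level needed/min bookkeeping and incremental score deltas) by a staged computation: build the per-cost creation-count table from the linear recurrence n[c]=n[c-1]+n[c-4], locate the cutoff level from running totals, and sum the final leaf multiset directly in closed form; the hinted per-leaf heap was tried and discarded because it cannot finish on the largest inputs of the domain.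
import Mathlib
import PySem

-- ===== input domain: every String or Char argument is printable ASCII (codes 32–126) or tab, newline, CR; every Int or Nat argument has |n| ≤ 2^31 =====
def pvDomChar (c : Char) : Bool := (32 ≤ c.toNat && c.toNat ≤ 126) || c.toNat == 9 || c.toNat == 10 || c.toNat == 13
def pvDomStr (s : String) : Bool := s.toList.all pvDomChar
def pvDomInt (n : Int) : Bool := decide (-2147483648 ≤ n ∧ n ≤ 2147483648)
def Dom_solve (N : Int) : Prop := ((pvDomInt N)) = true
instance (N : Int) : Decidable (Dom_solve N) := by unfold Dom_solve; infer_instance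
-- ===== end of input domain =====

-- B replaces A's online greedy simulation (indexed cost array, needed/min bookkeeping,
-- incremental score updates) by a staged computation: build the per-cost creation-count
-- table, locate the cutoff level from running totals, and sum the final leaf multiset
-- in closed form (objective: alternative).

-- ===== PORT A =====
-- loop over the range(1, N) list; cost[...] reads/writes via the total pyGetD/pySetD
-- forms (on Dom_solve every index A touches is in range 0..99, so they are exact).
def solveLoopA (N : Int) (range : List Int) (cost : List Int) (score count : Int) : Int :=
  match range with
  | [] => score
  | i :: rest =>
    let needed := N - count
    let available := min (PySem.List.pyGetD cost i 0) needed
    let score := score - available * i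
    let cost := PySem.List.pySetD cost (i + 1) (PySem.List.pyGetD cost (i + 1) 0 + available)
    let cost := PySem.List.pySetD cost (i + 4) (PySem.List.pyGetD cost (i + 4) 0 + available)
    let score := score + available * (i + 1) + available * (i + 4)
    let count := count + available
    if count = N then score else solveLoopA N rest cost score count

def solve (N : Int) : Int :=
  let cost := PySem.List.pySetD (PySem.List.pySetD (List.replicate 100 (0 : Int)) 1 1) 4 1
  solveLoopA N (PySem.List.pyRange 1 N 1) cost 5 2

-- ===== PORT B =====
-- Source B's first while-loop: grow the creation counts n and running totals S until the
-- totals reach N; n[-1]/n[-4]/S[-1] are the getD reads at len-1/len-4 (the lists always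
-- hold ≥ 5 entries).  Each pass grows S[-1] by ≥ 1, so fuel N.toNat runs it to its end.
def solveLoopB1 (fuel : Nat) (N : Int) (n S : List Int) : List Int × List Int :=
  match fuel with
  | 0 => (n, S)
  | f + 1 =>
    if S.getD (S.length - 1) 0 < N then
      let newn := n.getD (n.length - 1) 0 + n.getD (n.length - 4) 0
      solveLoopB1 f N (n ++ [newn]) (S ++ [S.getD (S.length - 1) 0 + newn])
    else (n, S)

-- Source B's second while-loop: linear scan for the first level L with S[L] >= N
-- (it stops within the list, so fuel S.length suffices).
def solveLoopB2 (fuel : Nat) (N : Int) (S : List Int) (L : Nat) : Nat :=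
  match fuel with
  | 0 => L
  | f + 1 => if S.getD L 0 < N then solveLoopB2 f N S (L + 1) else L

-- Source B's helper x(j): leaves expanded at cost j
def xvB (n : List Int) (L : Nat) (R : Int) (j : Int) : Int :=
  if 1 ≤ j ∧ j < (L : Int) then n.getD j.toNat 0
  else if j = (L : Int) then R
  else 0

-- Source B's stage 2 + stage 3 (cutoff scan, then the closed-form leaf-multiset sum
-- accumulated over range(L+1, L+5))
def solveStage3 (N : Int) (n S : List Int) : Int :=
  let L := solveLoopB2 S.length N S 0
  let R := N - S.getD (L - 1) 0
  (PySem.List.pyRange ((L : Int) + 1) ((L : Int) + 5) 1).foldl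
    (fun t c => t + (xvB n L R (c - 1) + xvB n L R (c - 4) + (if c = 4 then 1 else 0)) * c)
    ((n.getD L 0 - R) * (L : Int))

def solve_alt (N : Int) : Int :=
  if N ≤ 2 then 5
  else
    let p := solveLoopB1 N.toNat N [0, 1, 1, 1, 2] [2, 3, 4, 5, 7]
    solveStage3 N p.1 p.2

-- ===== PRECONDITION & SPEC =====
def Spec_solve (N : Int) (out : Int) : Prop := out = solve_alt N
instance (N : Int) (out : Int) : Decidable (Spec_solve N out) := by unfold Spec_solve; infer_instance

-- ===== CLAIM =====
def Claim_equal_solve : Prop := ∀ (N : Int), Dom_solve N → Spec_solve N (solve N)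

-- ===== LEMMAS AND PROOFS =====

-- Wf k = the window (pending leaf counts at costs k+1..k+4) at the start of level k+1,
-- assuming every level so far was fully expanded; Tc k = the leaf count at that point.
def stepW : Int × Int × Int × Int → Int × Int × Int × Int
  | (a, b, c, d) => (b + a, c, d, a)

def Wf : Nat → Int × Int × Int × Int
  | 0 => (1, 0, 0, 1)
  | k + 1 => stepW (Wf k)

def Tc : Nat → Int
  | 0 => 2
  | k + 1 => Tc k + (Wf k).1

-- nuf c = number of leaves ever created at cost c (seeds included)
def nuf : Nat → Int
  | 0 => 0
  | c + 1 => (Wf c).1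

-- msum m = total score increase from fully expanding all leaves of costs 1..m
def msum : Nat → Int
  | 0 => 0
  | m + 1 => msum m + nuf (m + 1) * ((m : Int) + 6)

lemma Wf_pos (k : Nat) : 1 ≤ (Wf k).1 ∧ 0 ≤ (Wf k).2.1 ∧ 0 ≤ (Wf k).2.2.1 ∧ 1 ≤ (Wf k).2.2.2 := by
  induction k with
  | zero => simp [Wf]
  | succ k ih =>
    rcases hW : Wf k with ⟨a, b, c, d⟩
    rw [hW] at ih
    simp only [Wf, hW, stepW]
    dsimp only at ih ⊢
    obtain ⟨h1, h2, h3, h4⟩ := ih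
    refine ⟨by omega, by omega, by omega, by omega⟩

lemma Tc_add_mono (j m : Nat) : Tc j ≤ Tc (j + m) := by
  induction m with
  | zero => rfl
  | succ m ih =>
    have := (Wf_pos (j + m)).1
    calc Tc j ≤ Tc (j + m) := ih
      _ ≤ Tc (j + m) + (Wf (j + m)).1 := by omega
      _ = Tc (j + m + 1) := rfl

lemma Tc_mono {j k : Nat} (h : j ≤ k) : Tc j ≤ Tc k := by
  have := Tc_add_mono j (k - j)
  rwa [Nat.add_sub_cancel' h] at this

set_option maxRecDepth 20000 in
lemma Tc95 : (2147483649 : Int) ≤ Tc 95 := by decide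

lemma Tc_ge (k : Nat) : (k : Int) + 2 ≤ Tc k := by
  induction k with
  | zero => simp [Tc]
  | succ k ih =>
    have := (Wf_pos k).1
    have : Tc k + 1 ≤ Tc (k + 1) := by simp only [Tc]; omega
    push_cast
    omega

lemma getD_app (p l2 : List Int) (n : Nat) (d : Int) (h : p.length ≤ n) :
    (p ++ l2).getD n d = l2.getD (n - p.length) d := by
  simp [List.getD, List.getElem?_append_right h]

-- the b component three levels on is the a component now (b_{k+3} = c_{k+2} = d_{k+1} = a_k)
lemma Wf_b3 (k : Nat) : (Wf (k + 3)).2.1 = (Wf k).1 := by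
  rcases hW : Wf k with ⟨a, b, c, d⟩
  show (Wf (k + 2 + 1)).2.1 = _
  rw [Wf]
  show (Wf (k + 1 + 1)).2.2.1 = _
  rw [Wf]
  show (Wf (k + 1)).2.2.2 = _
  rw [Wf, hW]
  rfl

lemma nuf_rec (m : Nat) : nuf (m + 5) = nuf (m + 4) + nuf (m + 1) := by
  have hb := Wf_b3 m
  show (Wf (m + 3 + 1)).1 = (Wf (m + 3)).1 + (Wf m).1
  rcases hW : Wf (m + 3) with ⟨a, b, c, d⟩
  rw [hW] at hb
  have hb' : b = (Wf m).1 := hb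
  rw [Wf, hW]
  show b + a = a + (Wf m).1
  omega

-- the weighted leaf-multiset identity behind stage 3 (for cutoff levels L = m+4 ≥ 4)
lemma ident (m : Nat) :
    nuf (m + 4) * ((m : Int) + 4) + nuf (m + 1) * ((m : Int) + 5)
      + nuf (m + 2) * ((m : Int) + 6) + nuf (m + 3) * ((m : Int) + 7)
      = 5 + msum (m + 3) := by
  induction m with
  | zero => decide
  | succ m ih =>
    have hr := nuf_rec m
    have hm : msum (m + 4) = msum (m + 3) + nuf (m + 4) * ((m : Int) + 9) := by
      show msum (m + 3 + 1) = _
      rw [msum]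
      push_cast
      ring
    rw [show m + 1 + 4 = m + 5 from rfl, hr,
      show m + 1 + 1 = m + 2 from rfl, show m + 1 + 2 = m + 3 from rfl,
      show m + 1 + 3 = m + 4 from rfl, hm]
    push_cast
    linear_combination ih

-- the lists built by Source B's stage 1: first 5+m creation counts and running totals
def nlist (m : Nat) : List Int := (List.range (5 + m)).map nuf
def Slist (m : Nat) : List Int := (List.range (5 + m)).map (fun c => Tc c)

lemma getD_map_range (f : Nat → Int) (len j : Nat) (h : j < len) :
    ((List.range len).map f).getD j 0 = f j := by
  rw [List.getD, List.getElem?_map, List.getElem?_range h]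
  rfl

lemma nlist_len (m : Nat) : (nlist m).length = 5 + m := by simp [nlist]
lemma Slist_len (m : Nat) : (Slist m).length = 5 + m := by simp [Slist]

lemma nlist_succ (m : Nat) : nlist (m + 1) = nlist m ++ [nuf (5 + m)] := by
  unfold nlist
  rw [show 5 + (m + 1) = (5 + m) + 1 from rfl, List.range_succ, List.map_append]
  rfl

lemma Slist_succ (m : Nat) : Slist (m + 1) = Slist m ++ [Tc (5 + m)] := by
  unfold Slist
  rw [show 5 + (m + 1) = (5 + m) + 1 from rfl, List.range_succ, List.map_append]
  rfl

lemma stage1_stop (fuel m : Nat) (N : Int) (h : N ≤ Tc (4 + m)) :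
    solveLoopB1 fuel N (nlist m) (Slist m) = (nlist m, Slist m) := by
  cases fuel with
  | zero => rfl
  | succ f =>
    rw [solveLoopB1, if_neg]
    rw [Slist_len, show 5 + m - 1 = 4 + m by omega]
    unfold Slist
    rw [getD_map_range _ _ _ (by omega)]
    omega

lemma stage1_step (f m : Nat) (N : Int) (h : Tc (4 + m) < N) :
    solveLoopB1 (f + 1) N (nlist m) (Slist m) = solveLoopB1 f N (nlist (m + 1)) (Slist (m + 1)) := by
  have hS : (Slist m).getD ((Slist m).length - 1) 0 = Tc (4 + m) := by
    rw [Slist_len, show 5 + m - 1 = 4 + m by omega]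
    unfold Slist
    rw [getD_map_range _ _ _ (by omega)]
  have hn1 : (nlist m).getD ((nlist m).length - 1) 0 = nuf (4 + m) := by
    rw [nlist_len, show 5 + m - 1 = 4 + m by omega]
    unfold nlist
    rw [getD_map_range _ _ _ (by omega)]
  have hn4 : (nlist m).getD ((nlist m).length - 4) 0 = nuf (m + 1) := by
    rw [nlist_len, show 5 + m - 4 = m + 1 by omega]
    unfold nlist
    rw [getD_map_range _ _ _ (by omega)]
  have hnew : nuf (4 + m) + nuf (m + 1) = nuf (5 + m) := by
    rw [show 5 + m = m + 5 by omega, nuf_rec, show m + 4 = 4 + m by omega]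
  have hTs : Tc (4 + m) + nuf (5 + m) = Tc (5 + m) := by
    rw [show 5 + m = (4 + m) + 1 by omega]
    rfl
  simp only [solveLoopB1]
  rw [hS, if_pos h, hn1, hn4, hnew, hTs, ← nlist_succ, ← Slist_succ]

lemma stage1_run (N : Int) (M : Nat) (hM : N ≤ Tc (4 + M)) (hMmin : ∀ j, j < 4 + M → Tc j < N) :
    ∀ (fuel m : Nat), m ≤ M → N - Tc (4 + m) ≤ (fuel : Int) →
    solveLoopB1 fuel N (nlist m) (Slist m) = (nlist M, Slist M) := by
  intro fuel
  induction fuel with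
  | zero =>
    intro m hm hf
    have : m = M := by
      by_contra hne
      have : Tc (4 + m) < N := hMmin (4 + m) (by omega)
      simp only [Nat.cast_zero] at hf
      omega
    subst this
    rfl
  | succ f ih =>
    intro m hm hf
    by_cases hstop : N ≤ Tc (4 + m)
    · have : m = M := by
        by_contra hne
        have : Tc (4 + m) < N := hMmin (4 + m) (by omega)
        omega
      subst this
      exact stage1_stop _ _ _ hstop
    · have hstop' : Tc (4 + m) < N := by omega
      have hmM : m < M := by
        by_contra hge
        have : m = M := by omega
        subst this
        omega
      rw [stage1_step f m N hstop']
      apply ih (m + 1) (by omega)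
      have h1 : Tc (4 + m) + 1 ≤ Tc (4 + (m + 1)) := by
        have := (Wf_pos (4 + m)).1
        rw [show 4 + (m + 1) = (4 + m) + 1 from by omega]
        show _ ≤ Tc (4 + m) + (Wf (4 + m)).1
        omega
      push_cast at hf ⊢
      omega

lemma scan_run (N : Int) (M L : Nat) (hL4 : L = 4 + M) (hLge : N ≤ Tc L)
    (hLmin : ∀ j, j < L → Tc j < N) :
    ∀ (fuel j : Nat), j ≤ L → L - j ≤ fuel → solveLoopB2 fuel N (Slist M) j = L := by
  intro fuel
  induction fuel with
  | zero =>
    intro j hj hfj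
    have : j = L := by omega
    subst this
    rfl
  | succ f ih =>
    intro j hj hfj
    by_cases hjL : j = L
    · subst hjL
      rw [solveLoopB2, if_neg]
      unfold Slist
      rw [getD_map_range _ _ _ (by omega)]
      omega
    · rw [solveLoopB2, if_pos]
      · exact ih (j + 1) (by omega) (by omega)
      · unfold Slist
        rw [getD_map_range _ _ _ (by omega)]
        exact hLmin j (by omega)

-- A's loop, started at the boundary of level k+1, returns its score plus the full
-- expansions of levels k+1..L-1 and the partial expansion at the cutoff level L.
lemma bisimA : ∀ (fuel : Nat) (N : Int) (L k : Nat) (p : List Int) (score : Int),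
    p.length = k + 1 →
    N ≤ 2147483648 →
    N ≤ Tc L →
    (∀ j, j < L → Tc j < N) →
    k < L →
    N - Tc k ≤ (fuel : Int) →
    solveLoopA N (PySem.List.pyRange ((k : Int) + 1) N 1)
        (p ++ ((Wf k).1 :: (Wf k).2.1 :: (Wf k).2.2.1 :: (Wf k).2.2.2 :: List.replicate (95 - k) 0))
        score (Tc k)
      = score + (msum (L - 1) - msum k) + (N - Tc (L - 1)) * ((L : Int) + 5) := by
  intro fuel
  induction fuel with
  | zero =>
    intro N L k p score hp hN hLge hLmin hkL hfuel
    exfalso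
    have := hLmin k hkL
    have := Tc_ge k
    simp only [Nat.cast_zero] at hfuel
    omega
  | succ f ih =>
    intro N L k p score hp hN hLge hLmin hkL hfuel
    have hlt : Tc k < N := hLmin k hkL
    have hk : k ≤ 94 := by
      by_contra hgt
      have h95 : (95 : Nat) ≤ k := by omega
      have hm := Tc_mono h95
      have h9 := Tc95
      omega
    have hTg := Tc_ge k
    have hiN : (k : Int) + 1 < N := by omega
    rcases hW : Wf k with ⟨a, b, c, d⟩
    have hpos := Wf_pos k
    rw [hW] at hpos
    dsimp only at hpos
    obtain ⟨ha, hb, hc, hd⟩ := hpos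
    dsimp only
    have hrep : List.replicate (95 - k) (0 : Int) = 0 :: List.replicate (94 - k) 0 := by
      rw [← List.replicate_succ]
      congr 1
      omega
    rw [hrep, PySem.List.pyRange_one_cons hiN]
    simp only [solveLoopA]
    have e1 : (k : Int) + 1 = ((k + 1 : Nat) : Int) := by push_cast; ring
    have e2 : (k : Int) + 1 + 1 = ((k + 2 : Nat) : Int) := by push_cast; ring
    have e4 : (k : Int) + 1 + 4 = ((k + 5 : Nat) : Int) := by push_cast; ring
    rw [show PySem.List.pyGetD (p ++ (a :: b :: c :: d :: 0 :: List.replicate (94 - k) 0)) ((k : Int) + 1) 0 = a by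
      rw [e1, PySem.List.pyGetD_natCast, getD_app _ _ _ _ (by omega)]
      simp [hp]]
    have hT1 : Tc (k + 1) = Tc k + a := by simp [Tc, hW]
    by_cases hfull : N - Tc k ≤ a
    · -- the cutoff level is exactly k+1: the loop stops here
      have hmin : min a (N - Tc k) = N - Tc k := min_eq_right hfull
      rw [hmin]
      rw [if_pos (by ring : Tc k + (N - Tc k) = N)]
      have hLk : L = k + 1 := by
        have h1 : N ≤ Tc (k + 1) := by omega
        by_contra hne
        have : Tc (k + 1) < N := hLmin (k + 1) (by omega)
        omega
      subst hLk
      rw [show k + 1 - 1 = k from rfl, sub_self]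
      push_cast
      ring
    · -- level k+1 is fully expanded and the loop continues
      have hmin : min a (N - Tc k) = a := min_eq_left (by omega)
      rw [hmin]
      rw [if_neg (by omega : ¬ Tc k + a = N)]
      rw [show PySem.List.pySetD (p ++ (a :: b :: c :: d :: 0 :: List.replicate (94 - k) 0)) ((k : Int) + 1 + 1)
            (PySem.List.pyGetD (p ++ (a :: b :: c :: d :: 0 :: List.replicate (94 - k) 0)) ((k : Int) + 1 + 1) 0 + a)
          = p ++ (a :: (b + a) :: c :: d :: 0 :: List.replicate (94 - k) 0) by
        rw [e2, PySem.List.pySetD_natCast, PySem.List.pyGetD_natCast,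
            getD_app _ _ _ _ (by omega), List.set_append_right _ _ (by omega)]
        simp [hp, List.set]]
      rw [show PySem.List.pyGetD (p ++ (a :: (b + a) :: c :: d :: 0 :: List.replicate (94 - k) 0)) ((k : Int) + 1 + 4) 0 = 0 by
        rw [e4, PySem.List.pyGetD_natCast, getD_app _ _ _ _ (by omega)]
        simp [hp]]
      rw [show PySem.List.pySetD (p ++ (a :: (b + a) :: c :: d :: 0 :: List.replicate (94 - k) 0)) ((k : Int) + 1 + 4) (0 + a)
          = p ++ (a :: (b + a) :: c :: d :: (0 + a) :: List.replicate (94 - k) 0) by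
        rw [e4, PySem.List.pySetD_natCast, List.set_append_right _ _ (by omega)]
        simp [hp, List.set]]
      rw [zero_add]
      have hW1 : Wf (k + 1) = (b + a, c, d, a) := by simp [Wf, hW, stepW]
      have hk1L : k + 1 < L := by
        by_contra hge
        have : Tc L ≤ Tc (k + 1) := Tc_mono (by omega)
        omega
      have hrec := ih N L (k + 1) (p ++ [a])
        (score - a * ((k : Int) + 1) + a * ((k : Int) + 1 + 1) + a * ((k : Int) + 1 + 4))
        (by simp [hp]) hN hLge hLmin hk1L
        (by rw [hT1]; push_cast at hfuel ⊢; omega)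
      rw [hW1, hT1] at hrec
      dsimp only at hrec
      rw [show ((k + 1 : Nat) : Int) + 1 = (k : Int) + 1 + 1 by push_cast; ring] at hrec
      rw [show (95 - (k + 1)) = 94 - k by omega] at hrec
      simp only [List.append_assoc, List.cons_append, List.nil_append] at hrec
      rw [hrec]
      have hms : msum (k + 1) = msum k + a * ((k : Int) + 6) := by
        rw [msum, show nuf (k + 1) = a by rw [nuf, hW]]
      linear_combination -hms

-- ===== VERDICT =====
set_option maxRecDepth 100000 in
theorem solve_spec : Claim_equal_solve := by
  unfold Claim_equal_solve Spec_solve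
  intro N hdom
  have hdom' : -2147483648 ≤ N ∧ N ≤ 2147483648 := by
    simpa [Dom_solve, pvDomInt] using hdom
  by_cases h1 : N ≤ 1
  · have hA : solve N = 5 := by
      unfold solve
      rw [PySem.List.pyRange_one_eq_nil (by omega)]
      rfl
    have hB : solve_alt N = 5 := by
      unfold solve_alt
      rw [if_pos (by omega)]
    rw [hA, hB]
  · by_cases h2 : N ≤ 5
    · interval_cases N <;> decide
    · have hN6 : 6 ≤ N := by omega
      -- the cutoff level L: the least level whose running total reaches N
      have hex : ∃ c, N ≤ Tc c := ⟨95, by have := Tc95; omega⟩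
      obtain ⟨L, hLge, hLmin⟩ : ∃ L, N ≤ Tc L ∧ ∀ j, j < L → Tc j < N := by
        refine ⟨Nat.find hex, Nat.find_spec hex, ?_⟩
        intro j hj
        have := Nat.find_min hex hj
        omega
      have hL4 : 4 ≤ L := by
        by_contra hlt
        have : Tc L ≤ Tc 3 := Tc_mono (by omega)
        have h3 : Tc 3 = 5 := by decide
        omega
      obtain ⟨m, rfl⟩ : ∃ m, L = 4 + m := ⟨L - 4, by omega⟩
      -- A's side
      have hA : solve N = solveLoopA N (PySem.List.pyRange 1 N 1)
          ([0] ++ ((1 : Int) :: 0 :: 0 :: 1 :: List.replicate 95 0)) 5 2 := by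
        unfold solve
        rfl
      have hb := bisimA (N - 2).toNat N (4 + m) 0 [0] 5 rfl hdom'.2 hLge hLmin (by omega)
        (by rw [show Tc 0 = 2 from rfl, Int.toNat_of_nonneg (by omega)])
      rw [show Tc 0 = 2 from rfl, show msum 0 = 0 from rfl] at hb
      simp only [Wf, Nat.cast_zero] at hb
      norm_num at hb
      rw [hA]
      -- B's side
      have hB : solve_alt N = solveStage3 N (nlist m) (Slist m) := by
        unfold solve_alt
        rw [if_neg (by omega)]
        show solveStage3 N (solveLoopB1 N.toNat N [0,1,1,1,2] [2,3,4,5,7]).1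
          (solveLoopB1 N.toNat N [0,1,1,1,2] [2,3,4,5,7]).2 = _
        rw [show ([0,1,1,1,2] : List Int) = nlist 0 by decide,
          show ([2,3,4,5,7] : List Int) = Slist 0 by decide]
        rw [stage1_run N m hLge hLmin N.toNat 0 (by omega)
          (by rw [show Tc (4 + 0) = 7 by decide, Int.toNat_of_nonneg (by omega)]; omega)]
      rw [hB]
      unfold solveStage3
      rw [Slist_len]
      rw [scan_run N m (4 + m) rfl hLge hLmin (5 + m) 0 (by omega) (by omega)]
      dsimp only
      rw [show (Slist m).getD (4 + m - 1) 0 = Tc (3 + m) by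
        unfold Slist; rw [show 4 + m - 1 = 3 + m by omega, getD_map_range _ _ _ (by omega)]]
      rw [show (nlist m).getD (4 + m) 0 = nuf (4 + m) by
        unfold nlist; rw [getD_map_range _ _ _ (by omega)]]
      -- unfold the 4-element range and the fold
      have hrange : PySem.List.pyRange (((4 + m : Nat) : Int) + 1) (((4 + m : Nat) : Int) + 5) 1
          = [((4 + m : Nat) : Int) + 1, ((4 + m : Nat) : Int) + 2,
             ((4 + m : Nat) : Int) + 3, ((4 + m : Nat) : Int) + 4] := by
        rw [PySem.List.pyRange_one_cons (by omega)]
        rw [show ((4 + m : Nat) : Int) + 1 + 1 = ((4 + m : Nat) : Int) + 2 by ring]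
        rw [PySem.List.pyRange_one_cons (by omega)]
        rw [show ((4 + m : Nat) : Int) + 2 + 1 = ((4 + m : Nat) : Int) + 3 by ring]
        rw [PySem.List.pyRange_one_cons (by omega)]
        rw [show ((4 + m : Nat) : Int) + 3 + 1 = ((4 + m : Nat) : Int) + 4 by ring]
        rw [PySem.List.pyRange_one_cons (by omega)]
        rw [show ((4 + m : Nat) : Int) + 4 + 1 = ((4 + m : Nat) : Int) + 5 by ring]
        rw [PySem.List.pyRange_one_eq_nil (by omega)]
      rw [hrange]
      simp only [List.foldl]
      -- evaluate the eight xvB values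
      set R : Int := N - Tc (3 + m) with hRdef
      have hx : ∀ (j : Nat), j < 4 + m → 1 ≤ j →
          xvB (nlist m) (4 + m) R ((j : Nat) : Int) = nuf j := by
        intro j hj hj1
        unfold xvB
        rw [if_pos (by constructor <;> [omega; (push_cast; omega)])]
        unfold nlist
        rw [show ((j : Nat) : Int).toNat = j by omega, getD_map_range _ _ _ (by omega)]
      have hxL : xvB (nlist m) (4 + m) R (((4 + m : Nat) : Int)) = R := by
        unfold xvB
        rw [if_neg (by push_cast; omega), if_pos rfl]
      have hx0 : ∀ (z : Int), ((4 + m : Nat) : Int) < z → xvB (nlist m) (4 + m) R z = 0 := by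
        intro z hz
        unfold xvB
        rw [if_neg (by push_cast at hz ⊢; omega), if_neg (by omega)]
      rw [show ((4 + m : Nat) : Int) + 1 - 1 = (((4 + m : Nat) : Int)) by ring, hxL]
      rw [show ((4 + m : Nat) : Int) + 1 - 4 = (((m + 1 : Nat) : Int)) by push_cast; ring,
        hx (m + 1) (by omega) (by omega)]
      rw [show ((4 + m : Nat) : Int) + 2 - 1 = ((4 + m : Nat) : Int) + 1 by ring,
        hx0 _ (by omega)]
      rw [show ((4 + m : Nat) : Int) + 2 - 4 = (((m + 2 : Nat) : Int)) by push_cast; ring,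
        hx (m + 2) (by omega) (by omega)]
      rw [show ((4 + m : Nat) : Int) + 3 - 1 = ((4 + m : Nat) : Int) + 2 by ring,
        hx0 _ (by omega)]
      rw [show ((4 + m : Nat) : Int) + 3 - 4 = (((m + 3 : Nat) : Int)) by push_cast; ring,
        hx (m + 3) (by omega) (by omega)]
      rw [show ((4 + m : Nat) : Int) + 4 - 1 = ((4 + m : Nat) : Int) + 3 by ring,
        hx0 _ (by omega)]
      rw [show ((4 + m : Nat) : Int) + 4 - 4 = (((4 + m : Nat) : Int)) by ring, hxL]
      rw [if_neg (by omega : ¬ ((4 + m : Nat) : Int) + 1 = 4),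
        if_neg (by omega : ¬ ((4 + m : Nat) : Int) + 2 = 4),
        if_neg (by omega : ¬ ((4 + m : Nat) : Int) + 3 = 4),
        if_neg (by omega : ¬ ((4 + m : Nat) : Int) + 4 = 4)]
      -- close with the weighted-multiset identity
      have hid := ident m
      rw [List.singleton_append, hb]
      rw [show 4 + m = m + 4 by omega, show 3 + m = m + 3 by omega]
      push_cast
      linear_combination -hid
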